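-- pv_equiv track=rewrite | github.com/rsivaraman18/Data_Structure | Geeks/03 First and Second Smallests.py | minAnd2ndMin
-- ===== SOURCE A (Python) =====
-- def minAnd2ndMin(arr):
--
--     if len(arr) < 2:
--         return -1, -1  # Return as a tuple to match expected output
--
--     # Initialize the two smallest numbers
--     first_min = second_min = float('inf')
--
--     for num in arr:
--         if num < first_min:
--             second_min = first_min  # Update second smallest
--             first_min = num  # Update smallest
--         elif num > first_min and num < second_min:
--             second_min = num  # Update second smallest if larger than first_min
--
--     # If second_min is not updated, it means no second distinct minimum exists
--     if second_min == float('inf'):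
--         return -1, -1
--
--     return first_min, second_min
-- ===== SOURCE B (Python) =====
-- def minAnd2ndMin(arr):
--     if len(arr) < 2:
--         return -1, -1
--     m = min(arr)
--     rest = [x for x in arr if x != m]
--     if not rest:
--         return -1, -1
--     return m, min(rest)
-- ===== Notes on version B (the rewrite author's own statement) =====
-- stated objective: simpler
-- what changed: Replaces the running two-variable state machine with two builtin min passes: take m = min(arr), drop all copies of m, and take the min of the remainder.
import Mathlib
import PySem

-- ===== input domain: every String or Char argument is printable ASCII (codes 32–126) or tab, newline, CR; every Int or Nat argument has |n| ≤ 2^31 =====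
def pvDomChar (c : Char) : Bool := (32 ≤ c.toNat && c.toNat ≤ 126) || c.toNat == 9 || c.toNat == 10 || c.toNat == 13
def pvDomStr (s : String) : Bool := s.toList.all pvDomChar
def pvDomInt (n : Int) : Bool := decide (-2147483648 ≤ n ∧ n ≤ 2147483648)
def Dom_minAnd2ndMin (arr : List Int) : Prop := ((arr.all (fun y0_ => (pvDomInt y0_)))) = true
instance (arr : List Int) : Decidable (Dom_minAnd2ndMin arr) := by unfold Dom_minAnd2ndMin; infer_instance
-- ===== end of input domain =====

-- B replaces A's running two-variable state machine with two plain min passes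
-- (min of the list, then min of the elements different from it): simpler.

-- ===== PORT A =====
-- float('inf') is modelled as `none`; `some v` is an ordinary number.
-- `num < first_min` with first_min possibly inf:
def pyLtInf (num : Int) (o : Option Int) : Bool :=
  match o with
  | none => true          -- num < inf
  | some v => num < v

-- `num > first_min` (first_min = inf is never exceeded):
def pyGtVal (num : Int) (o : Option Int) : Bool :=
  match o with
  | none => false
  | some v => v < num

-- one iteration of A's for-loop over the state (first_min, second_min)
def pyStep (st : Option Int × Option Int) (num : Int) : Option Int × Option Int :=
  if pyLtInf num st.1 then (some num, st.1)
  else if pyGtVal num st.1 && pyLtInf num st.2 then (st.1, some num)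
  else st

def minAnd2ndMin (arr : List Int) : Int × Int :=
  if arr.length < 2 then (-1, -1)
  else
    let st := arr.foldl pyStep (none, none)
    match st.2 with
    | none => (-1, -1)          -- second_min == inf
    | some s =>
      match st.1 with
      | none => (-1, -1)        -- unreachable: first_min ≤ second_min < inf
      | some f => (f, s)

-- ===== PORT B =====
def minAnd2ndMin_alt (arr : List Int) : Int × Int :=
  if arr.length < 2 then (-1, -1)
  else
    match PySem.List.min? arr (fun x => x) with     -- m = min(arr)
    | none => (-1, -1)                              -- unreachable: arr ≠ []
    | some m =>
      let rest := arr.filter (fun x => decide (x ≠ m))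
      match PySem.List.min? rest (fun x => x) with  -- min(rest)
      | none => (-1, -1)                            -- rest is empty
      | some s => (m, s)

-- ===== PRECONDITION & SPEC =====
def Spec_minAnd2ndMin (arr : List Int) (out : Int × Int) : Prop := out = minAnd2ndMin_alt arr
instance (arr : List Int) (out : Int × Int) : Decidable (Spec_minAnd2ndMin arr out) := by unfold Spec_minAnd2ndMin; infer_instance

-- ===== CLAIM (what is proved, stated in full; the proofs are below) =====
def Claim_equal_minAnd2ndMin : Prop := ∀ (arr : List Int), Dom_minAnd2ndMin arr → Spec_minAnd2ndMin arr (minAnd2ndMin arr)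

-- ===== LEMMAS AND PROOFS =====

theorem min_id_nil : PySem.List.min? ([] : List Int) (fun x => x) = none :=
  (PySem.List.min?_eq_none_iff (xs := ([] : List Int)) (key := fun x : Int => x)).mpr rfl

-- min? of a snoc, identity key
theorem min_id_snoc (l : List Int) (a : Int) :
    PySem.List.min? (l ++ [a]) (fun x => x)
      = some ((PySem.List.min? l (fun x => x)).elim a (fun m => min m a)) := by
  cases l with
  | nil => simp [PySem.List.min?_id_cons, min_id_nil]
  | cons x t => simp [PySem.List.min?_id_cons, List.foldl_append]

-- the minimum of l (as A's first_min)
def pm (l : List Int) : Option Int := PySem.List.min? l (fun x => x)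

-- the minimum of the elements strictly above the minimum (as A's second_min)
def ps (l : List Int) : Option Int :=
  match pm l with
  | none => none
  | some m => PySem.List.min? (l.filter (fun x => decide (m < x))) (fun x => x)

theorem ps_eq (l : List Int) (m : Int) (h : pm l = some m) :
    ps l = PySem.List.min? (l.filter (fun x => decide (m < x))) (fun x => x) := by
  unfold ps; rw [h]

theorem fold_char (l : List Int) : l.foldl pyStep (none, none) = (pm l, ps l) := by
  induction l using List.reverseRecOn with
  | nil => simp [pm, ps, min_id_nil]
  | append_singleton l a ih =>
    rw [List.foldl_append, List.foldl_cons, List.foldl_nil, ih]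
    rcases hpm : pm l with _ | m
    · have hl : l = [] := by
        have := PySem.List.min?_eq_none_iff (xs := l) (key := fun x : Int => x)
        exact this.mp hpm
      subst hl
      simp [pyStep, pyLtInf, pm, ps, PySem.List.min?_id_cons, min_id_nil]
    · have hmin : ∀ y ∈ l, m ≤ y := by
        intro y hy
        have := PySem.List.min?_isMin (xs := l) (key := fun x : Int => x) hpm y hy
        simpa using this
      have hpm' : pm (l ++ [a]) = some (min m a) := by
        unfold pm at hpm ⊢; rw [min_id_snoc, hpm]; rfl
      by_cases h1 : a < m
      · -- a becomes the new minimum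
        have hmina : min m a = a := by omega
        have hfa : (l ++ [a]).filter (fun x => decide (a < x)) = l := by
          rw [List.filter_append]
          have h2 : l.filter (fun x => decide (a < x)) = l :=
            List.filter_eq_self.mpr (fun x hx => by
              have := hmin x hx; simp; omega)
          simp [h2]
        have hps' : ps (l ++ [a]) = some m := by
          rw [ps_eq (l ++ [a]) a (by rw [hpm', hmina]), hfa]
          exact hpm
        rw [hps', hpm', hmina]
        simp [pyStep, pyLtInf, h1]
      · have hmina : min m a = m := by omega
        have hfsplit : (l ++ [a]).filter (fun x => decide (m < x))
            = l.filter (fun x => decide (m < x)) ++ (if m < a then [a] else []) := by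
          rw [List.filter_append]; by_cases h : m < a <;> simp [h]
        have hpseq := ps_eq l m hpm
        by_cases h2 : m < a
        · -- a is above the minimum: compare with second_min
          have hps' : ps (l ++ [a])
              = some ((ps l).elim a (fun sv => min sv a)) := by
            rw [ps_eq (l ++ [a]) m (by rw [hpm', hmina]), hfsplit, if_pos h2,
              min_id_snoc, hpseq]
          rw [hps', hpm', hmina]
          rcases hps : ps l with _ | sv
          · simp [pyStep, pyLtInf, pyGtVal, h1, h2]
          · by_cases h3 : a < sv
            · simp [pyStep, pyLtInf, pyGtVal, h1, h2, h3]; omega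
            · simp [pyStep, pyLtInf, pyGtVal, h1, h2, h3]; omega
        · -- a equals the minimum: nothing changes
          have hps' : ps (l ++ [a]) = ps l := by
            rw [ps_eq (l ++ [a]) m (by rw [hpm', hmina]), hfsplit, if_neg h2,
              List.append_nil, hpseq]
          rw [hps', hpm', hmina]
          simp [pyStep, pyLtInf, pyGtVal, h1, h2]

-- on a nonempty list, B's filter (x ≠ m) is A's filter (m < x)
theorem filter_ne_eq_filter_lt (l : List Int) (m : Int) (hpm : pm l = some m) :
    l.filter (fun x => decide (x ≠ m)) = l.filter (fun x => decide (m < x)) := by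
  apply List.filter_congr
  intro x hx
  have h2 : m ≤ x := by
    have := PySem.List.min?_isMin (xs := l) (key := fun x : Int => x) hpm x hx
    simpa using this
  simp only [decide_eq_decide]
  omega

-- ===== VERDICT (by name: the statement is the Claim_ definition above) =====
theorem minAnd2ndMin_spec : Claim_equal_minAnd2ndMin := by
  intro arr _
  unfold Spec_minAnd2ndMin minAnd2ndMin minAnd2ndMin_alt
  by_cases hlen : arr.length < 2
  · simp [hlen]
  · simp only [hlen, if_false]
    have hne : arr ≠ [] := by
      intro h; subst h; simp at hlen
    rcases hpm : PySem.List.min? arr (fun x => x) with _ | m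
    · exact absurd ((PySem.List.min?_eq_none_iff (xs := arr) (key := fun x : Int => x)).mp hpm) hne
    · have hpm' : pm arr = some m := hpm
      rw [fold_char arr, hpm']
      dsimp only
      rw [filter_ne_eq_filter_lt arr m hpm', ← ps_eq arr m hpm']
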